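-- pv_equiv track=rewrite | github.com/wes-stone/nixtla-scaffold | src/nixtla_scaffold/models.py | _default_model
-- ===== SOURCE A (Python) =====
-- def _default_model(model_cols: list[str]) -> str:
--     preferred = ["AutoARIMA", "AutoETS", "SeasonalNaive", "RandomWalkWithDrift", "Naive", "WindowAverage", "HistoricAverage"]
--     for model in preferred:
--         if model in model_cols:
--             return model
--     if not model_cols:
--         raise ValueError("no model forecast columns available for selection")
--     return model_cols[0]
-- ===== SOURCE B (Python) =====
-- def _default_model(model_cols: list[str]) -> str:
--     preferred = ["AutoARIMA", "AutoETS", "SeasonalNaive", "RandomWalkWithDrift", "Naive", "WindowAverage", "HistoricAverage"]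
--     rank = {name: i for i, name in enumerate(preferred)}
--     if not model_cols:
--         raise ValueError("no model forecast columns available for selection")
--     return min(model_cols, key=lambda c: rank.get(c, len(preferred)))
-- ===== Notes on version B (the rewrite author's own statement) =====
-- stated objective: alternative
-- what changed: Instead of scanning the fixed preference list and testing membership in model_cols for each name, B builds a rank table once and takes min(model_cols, key=rank) in a single pass over the candidates (min's first-wins tie-break reproduces A's model_cols[0] fallback).
import Mathlib
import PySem

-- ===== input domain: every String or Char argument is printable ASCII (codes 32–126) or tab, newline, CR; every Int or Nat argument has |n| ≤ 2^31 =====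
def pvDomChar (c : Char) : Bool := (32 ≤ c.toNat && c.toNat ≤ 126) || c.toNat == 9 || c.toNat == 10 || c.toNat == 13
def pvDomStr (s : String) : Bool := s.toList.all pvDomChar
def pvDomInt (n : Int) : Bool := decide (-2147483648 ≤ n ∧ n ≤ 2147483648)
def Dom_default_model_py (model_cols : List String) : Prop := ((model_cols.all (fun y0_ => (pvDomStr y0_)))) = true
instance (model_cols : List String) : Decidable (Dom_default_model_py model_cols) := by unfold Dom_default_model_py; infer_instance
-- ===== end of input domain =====

-- B replaces A's scan of the fixed preference list (one membership test per preferred name)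
-- by a rank table built once and a single min-by-rank pass over model_cols; same return value
-- everywhere A returns (both raise ValueError on the empty list, excluded by Pre_).

def preferredList : List String :=
  ["AutoARIMA", "AutoETS", "SeasonalNaive", "RandomWalkWithDrift", "Naive", "WindowAverage", "HistoricAverage"]

-- ===== PORT A =====
-- 'for model in preferred: if model in model_cols: return model'
def findPref : List String → List String → Option String
  | [], _ => none
  | p :: ps, cols => if p ∈ cols then some p else findPref ps cols

def default_model_py (model_cols : List String) : String :=
  (findPref preferredList model_cols).getD
    ((PySem.List.pyGet? model_cols 0).getD "")   -- model_cols[0]; on [] A raises (excluded by Pre_)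

-- ===== PORT B =====
-- rank = {name: i for i, name in enumerate(preferred)}
def pvRank : PySem.Dict String Int :=
  (PySem.List.enumerate preferredList 0).foldl (fun d iv => d.insert iv.2 iv.1) PySem.Dict.empty

-- lambda c: rank.get(c, len(preferred))
def pvKey (c : String) : Int := pvRank.getD c 7

-- min(model_cols, key=…): keeps the first element on ties, hence the strict '<' in the fold
def default_model_py_alt (model_cols : List String) : String :=
  match model_cols with
  | [] => ""   -- Source B raises ValueError here; excluded by Pre_
  | h :: t => t.foldl (fun best c => if pvKey c < pvKey best then c else best) h

-- ===== PRECONDITION & SPEC =====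
-- A raises ValueError exactly on the empty list (B raises there too).
def Pre_default_model_py (model_cols : List String) : Prop := model_cols ≠ []
instance (model_cols : List String) : Decidable (Pre_default_model_py model_cols) := by unfold Pre_default_model_py; infer_instance
def pvWitness_default_model_py : List String := (["yhat", "AutoETS"])

def Spec_default_model_py (model_cols : List String) (out : String) : Prop := out = default_model_py_alt model_cols
instance (model_cols : List String) (out : String) : Decidable (Spec_default_model_py model_cols out) := by unfold Spec_default_model_py; infer_instance

-- ===== CLAIM (what is proved, stated in full; the proofs are below) =====
def Claim_equal_default_model_py : Prop := ∀ (model_cols : List String), Dom_default_model_py model_cols → Pre_default_model_py model_cols → Spec_default_model_py model_cols (default_model_py model_cols)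

-- ===== LEMMAS AND PROOFS =====

-- the rank-table lookup, case by case (7 = absent)
theorem pvKey_cases (c : String) :
    (pvKey c = 0 ∧ c = "AutoARIMA") ∨ (pvKey c = 1 ∧ c = "AutoETS") ∨
    (pvKey c = 2 ∧ c = "SeasonalNaive") ∨ (pvKey c = 3 ∧ c = "RandomWalkWithDrift") ∨
    (pvKey c = 4 ∧ c = "Naive") ∨ (pvKey c = 5 ∧ c = "WindowAverage") ∨
    (pvKey c = 6 ∧ c = "HistoricAverage") ∨ pvKey c = 7 := by
  have h : pvRank = PySem.Dict.mk
      [("AutoARIMA", 0), ("AutoETS", 1), ("SeasonalNaive", 2), ("RandomWalkWithDrift", 3),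
       ("Naive", 4), ("WindowAverage", 5), ("HistoricAverage", 6)] := by rfl
  unfold pvKey
  rw [h]
  simp only [PySem.Dict.getD, PySem.Dict.get?_mk_cons]
  split_ifs with h1 h2 h3 h4 h5 h6 h7 <;>
    simp_all [beq_iff_eq, PySem.Dict.get?]

theorem foldB_mem (t : List String) (b : String) :
    t.foldl (fun best c => if pvKey c < pvKey best then c else best) b = b ∨
    t.foldl (fun best c => if pvKey c < pvKey best then c else best) b ∈ t := by
  induction t generalizing b with
  | nil => exact Or.inl rfl
  | cons x t ih =>
    simp only [List.foldl_cons]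
    rcases ih (if pvKey x < pvKey b then x else b) with h | h
    · rw [h]; split_ifs with hc
      · exact Or.inr List.mem_cons_self
      · exact Or.inl rfl
    · exact Or.inr (List.mem_cons_of_mem _ h)

theorem foldB_min (t : List String) (b : String) :
    pvKey (t.foldl (fun best c => if pvKey c < pvKey best then c else best) b) ≤ pvKey b ∧
    ∀ c ∈ t, pvKey (t.foldl (fun best c => if pvKey c < pvKey best then c else best) b) ≤ pvKey c := by
  induction t generalizing b with
  | nil => exact ⟨le_refl _, by simp⟩
  | cons x t ih =>
    simp only [List.foldl_cons]
    obtain ⟨h1, h2⟩ := ih (if pvKey x < pvKey b then x else b)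
    constructor
    · refine le_trans h1 ?_
      split_ifs with hc
      · exact le_of_lt hc
      · exact le_refl _
    · intro c hc
      rcases List.mem_cons.mp hc with rfl | hc
      · refine le_trans h1 ?_
        split_ifs with hc'
        · exact le_refl _
        · omega
      · exact h2 c hc

theorem foldB_keep (t : List String) (b : String)
    (h : ∀ c ∈ t, pvKey b ≤ pvKey c) :
    t.foldl (fun best c => if pvKey c < pvKey best then c else best) b = b := by
  induction t with
  | nil => rfl
  | cons x t ih =>
    simp only [List.foldl_cons]
    rw [if_neg (not_lt.mpr (h x List.mem_cons_self))]
    exact ih (fun c hc => h c (List.mem_cons_of_mem _ hc))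

-- the fold returns p whenever p is in the list, has minimal key, and is the unique value of its key
theorem foldB_eq (h : String) (t : List String) (p : String)
    (hp : p ∈ h :: t)
    (hmin : ∀ c ∈ h :: t, pvKey p ≤ pvKey c)
    (huniq : ∀ c ∈ h :: t, pvKey c = pvKey p → c = p) :
    t.foldl (fun best c => if pvKey c < pvKey best then c else best) h = p := by
  set r := t.foldl (fun best c => if pvKey c < pvKey best then c else best) h with hr
  have hrmem : r ∈ h :: t := by
    rcases foldB_mem t h with h1 | h1
    · rw [hr, h1]; exact List.mem_cons_self
    · exact List.mem_cons_of_mem _ h1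
  obtain ⟨h1, h2⟩ := foldB_min t h
  have hle : pvKey r ≤ pvKey p := by
    rcases List.mem_cons.mp hp with rfl | hp'
    · exact h1
    · exact h2 p hp'
  exact huniq r hrmem (le_antisymm hle (hmin r hrmem))

-- ===== VERDICT (by name: the statement is the Claim_ definition above) =====
theorem default_model_py_spec : Claim_equal_default_model_py := by
  intro cols _ hpre
  unfold Spec_default_model_py
  obtain ⟨h, t, rfl⟩ : ∃ h t, cols = h :: t := by
    cases cols with
    | nil => exact absurd rfl hpre
    | cons h t => exact ⟨h, t, rfl⟩
  unfold default_model_py default_model_py_alt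
  simp only [preferredList, findPref]
  have hfst : (PySem.List.pyGet? (h :: t) 0).getD "" = h := by simp [PySem.List.pyGet?, PySem.List.pyIdx?]
  split_ifs with h1 h2 h3 h4 h5 h6 h7 <;> simp only [Option.getD_some, Option.getD_none, hfst]
  all_goals first
  | (refine Eq.symm (foldB_eq h t _ (by assumption) (fun c hc => ?_) (fun c hc heq => ?_)) <;>
      (rcases pvKey_cases c with ⟨hk, rfl⟩|⟨hk, rfl⟩|⟨hk, rfl⟩|⟨hk, rfl⟩|⟨hk, rfl⟩|⟨hk, rfl⟩|⟨hk, rfl⟩|hk <;>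
        first
        | rfl
        | exact absurd hc (by assumption)
        | decide
        | (rw [hk]; decide)
        | (rw [hk] at heq; exact absurd heq (by decide))))
  | (have key7 : ∀ c ∈ h :: t, pvKey c = 7 := by
      intro c hc
      rcases pvKey_cases c with ⟨hk, rfl⟩|⟨hk, rfl⟩|⟨hk, rfl⟩|⟨hk, rfl⟩|⟨hk, rfl⟩|⟨hk, rfl⟩|⟨hk, rfl⟩|hk <;>
        first | exact absurd hc (by assumption) | exact hk
     refine Eq.symm (foldB_keep t h fun c hc => ?_)
     rw [key7 c (List.mem_cons_of_mem _ hc), key7 h List.mem_cons_self])
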